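-- pv_equiv track=rewrite | github.com/ishandutta2007/codeforces | ali_pi/normal/868/D.py | mset
-- ===== SOURCE A (Python) =====
-- p = [bin(p)[2:] for p in range(0,512)]
--
-- def mset(s):
--     ss = set()
--     for k in range(0,10):
--         for pi in range(0,2 ** k):
--             cs = p[pi]
--             cs = (k - len(cs)) * "0" + cs
--             if cs in s:
--                 ss.add(cs)
--     return ss
-- ===== SOURCE B (Python) =====
-- def mset(s):
--     sset = set(s)
--     out = set()
--     words = [""]
--     for _ in range(9):
--         words = [w + d for w in words for d in "01"]
--         for w in words:
--             if w in sset: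
--                 out.add(w)
--     return out
-- ===== Notes on version B (the rewrite author's own statement) =====
-- stated objective: alternative
-- what changed: B grows the length-1..9 binary words by appending a digit at a time (no bin() table, no zero-padding arithmetic) and tests each against a set built once from s, instead of formatting and padding all 1023 integers and scanning the list s for every candidate.
import Mathlib
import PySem

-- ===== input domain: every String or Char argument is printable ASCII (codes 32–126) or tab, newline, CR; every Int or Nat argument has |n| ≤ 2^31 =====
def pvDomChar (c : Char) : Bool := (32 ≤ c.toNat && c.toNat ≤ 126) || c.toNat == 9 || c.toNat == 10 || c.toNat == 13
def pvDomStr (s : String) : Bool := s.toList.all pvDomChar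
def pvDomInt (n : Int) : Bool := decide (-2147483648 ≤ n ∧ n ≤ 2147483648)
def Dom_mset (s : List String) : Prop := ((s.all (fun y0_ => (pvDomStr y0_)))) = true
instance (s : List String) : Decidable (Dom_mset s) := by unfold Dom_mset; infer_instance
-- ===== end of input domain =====

-- B grows the binary words digit by digit instead of padding A's precomputed bin() table, and probes a
-- set built once from s instead of scanning the list s per candidate (objective: alternative).

-- ===== PORT A =====
-- bin(n)[2:] for n ≥ 0, ported by hand (exact for the nonnegative arguments range(0,512) supplies);
-- Python strings are carried as their character lists (the PySem.Chars representation)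
def pvBinChars : Nat → List Char
  | 0 => ['0']
  | 1 => ['1']
  | n+2 => pvBinChars ((n+2)/2) ++ [if (n+2) % 2 = 0 then '0' else '1']

-- p = [bin(p)[2:] for p in range(0,512)]
def pvP : List (List Char) := (PySem.List.pyRange 0 512 1).map (fun pi => pvBinChars pi.toNat)

-- 2 ** k is (2:Int)^k.toNat (exact: k ∈ range(0,10) is nonnegative); p[pi] via pyGetD (exact: 0 ≤ pi < 512);
-- (k - len(cs)) * "0" + cs is List.replicate with Int.toNat (Python's negative repeat gives "", as does toNat's clamp)
def mset (s : List String) : List String :=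
  (PySem.List.pyRange 0 10 1).foldl (fun ss k =>
    (PySem.List.pyRange 0 ((2:Int)^k.toNat) 1).foldl (fun ss pi =>
      let cs := PySem.List.pyGetD pvP pi []
      let cs := List.replicate ((k - (cs.length : Int)).toNat) '0' ++ cs
      if s.contains (String.ofList cs) then PySem.Set.add ss (String.ofList cs) else ss) ss) []

-- ===== PORT B =====
-- words are Python strings, carried as their character lists; w + d appends the character of "01"
def mset_alt (s : List String) : List String :=
  let sset := PySem.Set.ofList s
  (((PySem.List.pyRange 0 9 1).foldl (fun (st : List (List Char) × List String) _ =>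
      let words := st.1.flatMap (fun w => ("01".toList).map (fun d => w ++ [d]))
      let out := words.foldl (fun o w => if PySem.Set.contains sset (String.ofList w) then PySem.Set.add o (String.ofList w) else o) st.2
      (words, out)) (([[]] : List (List Char)), ([] : List String)))).2

-- ===== PRECONDITION & SPEC =====
def Spec_mset (s : List String) (out : List String) : Prop := out = mset_alt s
instance (s : List String) (out : List String) : Decidable (Spec_mset s out) := by unfold Spec_mset; infer_instance

-- ===== CLAIM (what is proved, stated in full; the proofs are below) =====
def Claim_equal_mset : Prop := ∀ (s : List String), Dom_mset s → Spec_mset s (mset s)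

-- ===== LEMMAS AND PROOFS =====
set_option maxRecDepth 8000
set_option maxHeartbeats 1000000

-- the shared loop body "if cs in s: ss.add(cs)"
def pvF (s : List String) (ss : List String) (w : List Char) : List String :=
  if s.contains (String.ofList w) then PySem.Set.add ss (String.ofList w) else ss

-- B's loop body, testing against set(s)
def pvFB (s : List String) (o : List String) (w : List Char) : List String :=
  if PySem.Set.contains (PySem.Set.ofList s) (String.ofList w) then PySem.Set.add o (String.ofList w) else o

-- zero-padding to width k
def pvPad (k : Nat) (cs : List Char) : List Char := List.replicate (k - cs.length) '0' ++ cs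

-- A's level-k candidates: the padded bin() strings of the numbers below 2^k
def pvLevel (k : Nat) : List (List Char) := (List.range (2^k)).map (fun q => pvPad k (pvBinChars q))

-- B's level-k words: all binary words of length k, grown digit by digit
def pvWords : Nat → List (List Char)
  | 0 => [[]]
  | k+1 => (pvWords k).flatMap (fun w => [w ++ ['0'], w ++ ['1']])

theorem pvBinChars_eq (m : Nat) (h : 2 ≤ m) :
    pvBinChars m = pvBinChars (m/2) ++ [if m % 2 = 0 then '0' else '1'] := by
  match m, h with
  | (n+2), _ => simp [pvBinChars]

theorem pvRangeDouble {α : Type} (f : Nat → α) :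
    ∀ (n : Nat), (List.range (2*n)).map f = (List.range n).flatMap (fun q => [f (2*q), f (2*q+1)]) := by
  intro n
  induction n with
  | zero => rfl
  | succ n ih =>
    have h2 : 2*(n+1) = (2*n+1)+1 := by omega
    rw [h2, List.range_succ, List.range_succ, List.range_succ, List.map_append, List.map_append,
      List.flatMap_append, ← ih]
    simp

theorem pvPad_double (k : Nat) (q : Nat) :
    pvPad (k+2) (pvBinChars (2*q)) = pvPad (k+1) (pvBinChars q) ++ ['0'] ∧
    pvPad (k+2) (pvBinChars (2*q+1)) = pvPad (k+1) (pvBinChars q) ++ ['1'] := by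
  rcases Nat.eq_zero_or_pos q with hq | hq
  · subst hq
    constructor <;> simp [pvBinChars, pvPad, List.replicate_succ']
  · have h0 : pvBinChars (2*q) = pvBinChars q ++ ['0'] := by
      rw [pvBinChars_eq (2*q) (by omega)]
      congr 1
      · congr 1; omega
      · simp [Nat.mul_mod_right]
    have h1 : pvBinChars (2*q+1) = pvBinChars q ++ ['1'] := by
      rw [pvBinChars_eq (2*q+1) (by omega)]
      congr 1
      · congr 1; omega
      · have : (2*q+1) % 2 = 1 := by omega
        simp [this]
    constructor <;> [rw [h0]; rw [h1]] <;> simp [pvPad, List.length_append]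

theorem pvFlatMap_congr {α β : Type} (l : List α) (f g : α → List β)
    (h : ∀ x ∈ l, f x = g x) : l.flatMap f = l.flatMap g := by
  induction l with
  | nil => rfl
  | cons x xs ih =>
    simp only [List.flatMap_cons, h x (by simp)]
    rw [ih (fun y hy => h y (by simp [hy]))]

theorem pvLevel_eq_words : ∀ (k : Nat), pvLevel (k+1) = pvWords (k+1) := by
  intro k
  induction k with
  | zero =>
    show pvLevel 1 = pvWords 1
    rw [pvLevel, show (2:Nat)^1 = 2 from rfl, show List.range 2 = [0, 1] from rfl]
    simp [pvPad, pvWords, show pvBinChars 0 = ['0'] from by simp [pvBinChars],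
      show pvBinChars 1 = ['1'] from by simp [pvBinChars]]
  | succ k ih =>
    show pvLevel (k+2) = pvWords (k+2)
    have hpow : 2^(k+2) = 2*(2^(k+1)) := by ring
    rw [pvLevel, hpow, pvRangeDouble, pvWords, ← ih, pvLevel, List.flatMap_map]
    exact (pvFlatMap_congr _ _ _ (fun q _ => by
      rw [(pvPad_double k q).1, (pvPad_double k q).2])).symm

-- A's inner loop over range(2**k) is a pvF-fold over pvLevel k
theorem pvInner (s : List String) (k : Int) (hk : 0 ≤ k) (hk9 : k ≤ 9) (ss : List String) :
    (PySem.List.pyRange 0 ((2:Int)^k.toNat) 1).foldl (fun ss pi =>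
      let cs := PySem.List.pyGetD pvP pi []
      let cs := List.replicate ((k - (cs.length : Int)).toNat) '0' ++ cs
      if s.contains (String.ofList cs) then PySem.Set.add ss (String.ofList cs) else ss) ss
    = (pvLevel k.toNat).foldl (pvF s) ss := by
  have h2 : ((2:Int)^k.toNat) = ((2^k.toNat : Nat) : Int) := by exact_mod_cast rfl
  rw [h2, PySem.List.pyRange_one, pvLevel, List.foldl_map, List.foldl_map]
  have hb : ((2^k.toNat : Nat) : Int) - 0 = ((2^k.toNat : Nat) : Int) := by ring
  rw [hb, Int.toNat_natCast]
  apply PySem.List.foldl_congr_mem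
  intro acc q hq
  rw [List.mem_range] at hq
  have hq512 : q < 512 := by
    have : 2^k.toNat ≤ 2^9 := Nat.pow_le_pow_right (by norm_num) (by omega)
    omega
  have hget : PySem.List.pyGetD pvP ((0:Int) + (q:Int)) [] = pvBinChars q := by
    unfold pvP
    rw [PySem.List.pyGetD_map_pyRange_of_nonneg _ 512 _ _ (by omega) (by push_cast; omega)]
    simp
  simp only [hget]
  have harg : ((k - ((pvBinChars q).length : Int)).toNat) = k.toNat - (pvBinChars q).length := by
    omega
  rw [harg]
  rfl

-- adding the same candidate twice in a row changes nothing (set add is idempotent)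
theorem pvF_dup (s : List String) (acc : List String) (c : List Char) :
    pvF s (pvF s acc c) c = pvF s acc c := by
  by_cases h : String.ofList c ∈ s
  · by_cases h2 : String.ofList c ∈ acc
    · simp [pvF, PySem.Set.add, h, h2]
    · simp [pvF, PySem.Set.add, h, h2]
  · simp [pvF, h]

-- membership in set(s) is membership in s
theorem pvFB_eq_pvF (s : List String) : pvFB s = pvF s := by
  funext o w
  unfold pvFB pvF
  simp [pysem]

-- B unrolled: nine rounds of doubling, each folded into the output set
theorem pvB_fold (s : List String) : mset_alt s =
    (pvWords 9).foldl (pvFB s) ((pvWords 8).foldl (pvFB s) ((pvWords 7).foldl (pvFB s)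
      ((pvWords 6).foldl (pvFB s) ((pvWords 5).foldl (pvFB s) ((pvWords 4).foldl (pvFB s)
      ((pvWords 3).foldl (pvFB s) ((pvWords 2).foldl (pvFB s) ((pvWords 1).foldl (pvFB s) [])))))))) := rfl

-- ===== VERDICT (by name: the statement is the Claim_ definition above) =====
theorem mset_spec : Claim_equal_mset := by
  intro s _
  unfold Spec_mset
  show mset s = mset_alt s
  rw [pvB_fold, pvFB_eq_pvF]
  unfold mset
  rw [show PySem.List.pyRange 0 10 1 = [0,1,2,3,4,5,6,7,8,9] from by decide]
  simp only [List.foldl_cons, List.foldl_nil]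
  rw [pvInner s 0 (by norm_num) (by norm_num), pvInner s 1 (by norm_num) (by norm_num),
      pvInner s 2 (by norm_num) (by norm_num), pvInner s 3 (by norm_num) (by norm_num),
      pvInner s 4 (by norm_num) (by norm_num), pvInner s 5 (by norm_num) (by norm_num),
      pvInner s 6 (by norm_num) (by norm_num), pvInner s 7 (by norm_num) (by norm_num),
      pvInner s 8 (by norm_num) (by norm_num), pvInner s 9 (by norm_num) (by norm_num)]
  simp only [show ((0:Int).toNat) = 0 from rfl, show ((1:Int).toNat) = 1 from rfl,
      show ((2:Int).toNat) = 2 from rfl, show ((3:Int).toNat) = 3 from rfl,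
      show ((4:Int).toNat) = 4 from rfl, show ((5:Int).toNat) = 5 from rfl,
      show ((6:Int).toNat) = 6 from rfl, show ((7:Int).toNat) = 7 from rfl,
      show ((8:Int).toNat) = 8 from rfl, show ((9:Int).toNat) = 9 from rfl]
  rw [show pvLevel 0 = [['0']] from by
    rw [pvLevel, show (2:Nat)^0 = 1 from rfl, show List.range 1 = [0] from rfl]
    simp [pvPad, show pvBinChars 0 = ['0'] from by simp [pvBinChars]]]
  rw [show pvLevel 1 = pvWords 1 from pvLevel_eq_words 0,
      show pvLevel 2 = pvWords 2 from pvLevel_eq_words 1,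
      show pvLevel 3 = pvWords 3 from pvLevel_eq_words 2,
      show pvLevel 4 = pvWords 4 from pvLevel_eq_words 3,
      show pvLevel 5 = pvWords 5 from pvLevel_eq_words 4,
      show pvLevel 6 = pvWords 6 from pvLevel_eq_words 5,
      show pvLevel 7 = pvWords 7 from pvLevel_eq_words 6,
      show pvLevel 8 = pvWords 8 from pvLevel_eq_words 7,
      show pvLevel 9 = pvWords 9 from pvLevel_eq_words 8]
  simp only [List.foldl_cons, List.foldl_nil]
  rw [show (pvWords 1) = [['0'],['1']] from by simp [pvWords]]
  simp only [List.foldl_cons, List.foldl_nil]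
  rw [pvF_dup]
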